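-- pv_equiv track=rewrite | github.com/patidar12/Programs | cdnjs/DynamicProgramming/constructArray.py | countArray
-- ===== SOURCE A (Python) =====
-- def countArray(n, k, x):
--     # Return the number of ways to fill in the array.
--     oneCount = 1
--     nonOneCount = 0
--     mod = 1000000007
--     for i in range(1,n):
--         prevOneCount = oneCount
--         oneCount = (nonOneCount * (k-1))%mod
--         nonOneCount = (prevOneCount + (nonOneCount*(k-2))%mod)%mod
--     if(x == 1):
--         return oneCount
--     return nonOneCount
-- ===== SOURCE B (Python) =====
-- def countArray(n, k, x):
--     # Matrix exponentiation of the 2-state recurrence: O(log n) instead of O(n).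
--     mod = 1000000007
--     def mmul(A, B):
--         a, b, c, d = A
--         e, f, g, h = B
--         return ((a * e + b * g) % mod, (a * f + b * h) % mod,
--                 (c * e + d * g) % mod, (c * f + d * h) % mod)
--     # row vector (one, non) -> (one, non) * M with M = [[0, 1], [k-1, k-2]]
--     M = (0, 1, k - 1, k - 2)
--     R = (1, 0, 0, 1)
--     e = n - 1
--     while e > 0:
--         if e % 2 == 1:
--             R = mmul(R, M)
--         M = mmul(M, M)
--         e //= 2
--     # starting vector (1, 0): result is the first row of R = M**(n-1)
--     return R[0] if x == 1 else R[1]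
-- ===== Notes on version B (the rewrite author's own statement) =====
-- stated objective: faster
-- what changed: Replaces A's O(n) two-state DP loop with binary exponentiation of the 2x2 transition matrix [[0,1],[k-1,k-2]] mod 1000000007, applied to the start vector (1,0).
import Mathlib
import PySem

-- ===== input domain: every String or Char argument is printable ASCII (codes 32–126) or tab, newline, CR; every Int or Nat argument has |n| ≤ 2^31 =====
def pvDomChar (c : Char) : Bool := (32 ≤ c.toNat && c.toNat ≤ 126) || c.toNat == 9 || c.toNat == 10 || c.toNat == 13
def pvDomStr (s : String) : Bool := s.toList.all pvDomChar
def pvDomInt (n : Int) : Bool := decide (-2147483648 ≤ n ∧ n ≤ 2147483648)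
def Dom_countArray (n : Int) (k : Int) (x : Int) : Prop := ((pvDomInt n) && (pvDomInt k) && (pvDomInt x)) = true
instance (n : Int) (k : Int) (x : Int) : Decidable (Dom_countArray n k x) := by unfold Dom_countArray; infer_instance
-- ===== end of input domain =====

-- B replaces A's O(n) DP loop by O(log n) binary exponentiation of the 2×2 transition matrix mod 1000000007.

-- ===== PORT A =====
def countArray (n : Int) (k : Int) (x : Int) : Int :=
  let s := (PySem.List.pyRange 1 n 1).foldl
    (fun (st : Int × Int) _ =>
      (PySem.Int.mod (st.2 * (k - 1)) 1000000007,
       PySem.Int.mod (st.1 + PySem.Int.mod (st.2 * (k - 2)) 1000000007) 1000000007))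
    (1, 0)
  if x = 1 then s.1 else s.2

-- ===== PORT B =====
-- 2×2 matrices as tuples (m00, m01, m10, m11); product reduced mod 1000000007
def pvMMul : (Int × Int × Int × Int) → (Int × Int × Int × Int) → (Int × Int × Int × Int)
  | (a, b, c, d), (e, f, g, h) =>
    (PySem.Int.mod (a * e + b * g) 1000000007, PySem.Int.mod (a * f + b * h) 1000000007,
     PySem.Int.mod (c * e + d * g) 1000000007, PySem.Int.mod (c * f + d * h) 1000000007)

-- the 'while e > 0' square-and-multiply loop of Source B
def pvPowLoop (e : Int) (R M : Int × Int × Int × Int) : Int × Int × Int × Int :=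
  if _h : 0 < e then
    pvPowLoop (PySem.Int.floordiv e 2)
      (if PySem.Int.mod e 2 = 1 then pvMMul R M else R)
      (pvMMul M M)
  else R
termination_by e.toNat
decreasing_by
  rw [PySem.Int.floordiv_eq_ediv_of_pos (by omega : (0:Int) < 2)]; omega

def countArray_alt (n : Int) (k : Int) (x : Int) : Int :=
  let R := pvPowLoop (n - 1) (1, 0, 0, 1) (0, 1, k - 1, k - 2)
  if x = 1 then R.1 else R.2.1

-- ===== PRECONDITION & SPEC =====
def Spec_countArray (n : Int) (k : Int) (x : Int) (out : Int) : Prop := out = countArray_alt n k x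
instance (n : Int) (k : Int) (x : Int) (out : Int) : Decidable (Spec_countArray n k x out) := by unfold Spec_countArray; infer_instance

-- ===== CLAIM (what is proved, stated in full; the proofs are below) =====
def Claim_equal_countArray : Prop := ∀ (n : Int) (k : Int) (x : Int), Dom_countArray n k x → Spec_countArray n k x (countArray n k x)

-- ===== LEMMAS AND PROOFS =====

-- Z-level (ZMod 1000000007) shadows of the two computations
def pvZmul : (ZMod 1000000007 × ZMod 1000000007 × ZMod 1000000007 × ZMod 1000000007) →
    (ZMod 1000000007 × ZMod 1000000007 × ZMod 1000000007 × ZMod 1000000007) →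
    (ZMod 1000000007 × ZMod 1000000007 × ZMod 1000000007 × ZMod 1000000007)
  | (a, b, c, d), (e, f, g, h) => (a * e + b * g, a * f + b * h, c * e + d * g, c * f + d * h)

def pvZpow (M : ZMod 1000000007 × ZMod 1000000007 × ZMod 1000000007 × ZMod 1000000007) :
    Nat → (ZMod 1000000007 × ZMod 1000000007 × ZMod 1000000007 × ZMod 1000000007)
  | 0 => (1, 0, 0, 1)
  | e + 1 => pvZmul (pvZpow M e) M

def pvCast4 : (Int × Int × Int × Int) →
    (ZMod 1000000007 × ZMod 1000000007 × ZMod 1000000007 × ZMod 1000000007)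
  | (a, b, c, d) => ((a : ZMod 1000000007), (b : ZMod 1000000007), (c : ZMod 1000000007), (d : ZMod 1000000007))

def pvCast2 : (Int × Int) → (ZMod 1000000007 × ZMod 1000000007)
  | (a, b) => ((a : ZMod 1000000007), (b : ZMod 1000000007))

def pvRed4 (A : Int × Int × Int × Int) : Prop :=
  (0 ≤ A.1 ∧ A.1 < 1000000007) ∧ (0 ≤ A.2.1 ∧ A.2.1 < 1000000007) ∧
  (0 ≤ A.2.2.1 ∧ A.2.2.1 < 1000000007) ∧ (0 ≤ A.2.2.2 ∧ A.2.2.2 < 1000000007)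

def pvRed2 (A : Int × Int) : Prop :=
  (0 ≤ A.1 ∧ A.1 < 1000000007) ∧ (0 ≤ A.2 ∧ A.2 < 1000000007)

def pvZstep (k : Int) (v : ZMod 1000000007 × ZMod 1000000007) : ZMod 1000000007 × ZMod 1000000007 :=
  (v.2 * ((k : ZMod 1000000007) - 1), v.1 + v.2 * ((k : ZMod 1000000007) - 2))

def pvVmul (v : ZMod 1000000007 × ZMod 1000000007)
    (M : ZMod 1000000007 × ZMod 1000000007 × ZMod 1000000007 × ZMod 1000000007) :
    ZMod 1000000007 × ZMod 1000000007 :=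
  (v.1 * M.1 + v.2 * M.2.2.1, v.1 * M.2.1 + v.2 * M.2.2.2)

lemma pvCastMod (a : Int) :
    ((PySem.Int.mod a 1000000007 : Int) : ZMod 1000000007) = (a : ZMod 1000000007) := by
  rw [PySem.Int.mod_eq_emod_of_pos (by norm_num)]
  exact_mod_cast ZMod.intCast_mod a 1000000007

lemma pvModRange (a : Int) : 0 ≤ PySem.Int.mod a 1000000007 ∧ PySem.Int.mod a 1000000007 < 1000000007 :=
  ⟨PySem.Int.mod_nonneg a (by norm_num), PySem.Int.mod_lt a (by norm_num)⟩

lemma pvIntEqOfCast (a b : Int) (ha : 0 ≤ a) (hb : a < 1000000007) (hc : 0 ≤ b) (hd : b < 1000000007)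
    (h : (a : ZMod 1000000007) = (b : ZMod 1000000007)) : a = b := by
  rw [ZMod.intCast_eq_intCast_iff] at h
  have h2 : a % (1000000007 : Int) = b % (1000000007 : Int) := by exact_mod_cast h
  omega

lemma pvCast_mmul (A B : Int × Int × Int × Int) :
    pvCast4 (pvMMul A B) = pvZmul (pvCast4 A) (pvCast4 B) := by
  obtain ⟨a, b, c, d⟩ := A; obtain ⟨e, f, g, h⟩ := B
  simp only [pvMMul, pvZmul, pvCast4, Prod.mk.injEq]
  refine ⟨?_, ?_, ?_, ?_⟩ <;> (rw [pvCastMod]; push_cast; ring)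

lemma pvRed_mmul (A B : Int × Int × Int × Int) : pvRed4 (pvMMul A B) := by
  obtain ⟨a, b, c, d⟩ := A; obtain ⟨e, f, g, h⟩ := B
  simp only [pvMMul, pvRed4]
  exact ⟨pvModRange _, pvModRange _, pvModRange _, pvModRange _⟩

lemma pvZmul_assoc (A B C : ZMod 1000000007 × ZMod 1000000007 × ZMod 1000000007 × ZMod 1000000007) :
    pvZmul (pvZmul A B) C = pvZmul A (pvZmul B C) := by
  obtain ⟨a, b, c, d⟩ := A; obtain ⟨e, f, g, h⟩ := B; obtain ⟨i, j, l, m⟩ := C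
  simp only [pvZmul, Prod.mk.injEq]
  refine ⟨by ring, by ring, by ring, by ring⟩

lemma pvZmul_one_left (M : ZMod 1000000007 × ZMod 1000000007 × ZMod 1000000007 × ZMod 1000000007) :
    pvZmul (1, 0, 0, 1) M = M := by
  obtain ⟨a, b, c, d⟩ := M
  simp only [pvZmul, Prod.mk.injEq]
  refine ⟨by ring, by ring, by ring, by ring⟩

lemma pvZmul_one_right (M : ZMod 1000000007 × ZMod 1000000007 × ZMod 1000000007 × ZMod 1000000007) :
    pvZmul M (1, 0, 0, 1) = M := by
  obtain ⟨a, b, c, d⟩ := M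
  simp only [pvZmul, Prod.mk.injEq]
  refine ⟨by ring, by ring, by ring, by ring⟩

lemma pvZpow_succ_left (M : ZMod 1000000007 × ZMod 1000000007 × ZMod 1000000007 × ZMod 1000000007)
    (e : Nat) : pvZpow M (e + 1) = pvZmul M (pvZpow M e) := by
  induction e with
  | zero => simp [pvZpow, pvZmul_one_left, pvZmul_one_right]
  | succ e ih =>
      show pvZmul (pvZpow M (e + 1)) M = _
      rw [ih, pvZmul_assoc]
      show pvZmul M (pvZpow M (e + 1)) = _
      rw [ih]

lemma pvZpow_double (M : ZMod 1000000007 × ZMod 1000000007 × ZMod 1000000007 × ZMod 1000000007)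
    (h : Nat) : pvZpow (pvZmul M M) h = pvZpow M (2 * h) := by
  induction h with
  | zero => rfl
  | succ h ih =>
      show pvZmul (pvZpow (pvZmul M M) h) (pvZmul M M) = _
      rw [ih, ← pvZmul_assoc]
      have h1 : pvZmul (pvZpow M (2 * h)) M = pvZpow M (2 * h + 1) := rfl
      have h2 : 2 * (h + 1) = (2 * h + 1) + 1 := by omega
      rw [h1, h2]
      rfl

lemma pvLoop_cast (e : Int) (R M : Int × Int × Int × Int) :
    pvCast4 (pvPowLoop e R M) = pvZmul (pvCast4 R) (pvZpow (pvCast4 M) e.toNat) := by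
  induction e, R, M using pvPowLoop.induct with
  | case1 e R M hpos ih =>
      simp only [dite_eq_ite] at ih
      rw [pvPowLoop, dif_pos hpos, ih, pvCast_mmul, pvZpow_double]
      have hd : (PySem.Int.floordiv e 2) = e / 2 := PySem.Int.floordiv_eq_ediv_of_pos (by norm_num)
      have hm : (PySem.Int.mod e 2) = e % 2 := PySem.Int.mod_eq_emod_of_pos (by norm_num)
      by_cases hodd : PySem.Int.mod e 2 = 1
      · have he : e.toNat = 2 * (PySem.Int.floordiv e 2).toNat + 1 := by rw [hd]; rw [hm] at hodd; omega
        rw [if_pos hodd, pvCast_mmul, pvZmul_assoc, he]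
        congr 1
        rw [pvZpow_succ_left]
      · have he : e.toNat = 2 * (PySem.Int.floordiv e 2).toNat := by
          rw [hd]; rw [hm] at hodd; omega
        rw [if_neg hodd, he]
  | case2 e R M hpos =>
      rw [pvPowLoop, dif_neg hpos]
      have : e.toNat = 0 := by omega
      rw [this]
      exact (pvZmul_one_right _).symm

lemma pvLoop_red (e : Int) (R M : Int × Int × Int × Int) (he : 0 < e) :
    pvRed4 (pvPowLoop e R M) := by
  induction e, R, M using pvPowLoop.induct with
  | case1 e R M hpos ih =>
      rw [pvPowLoop, dif_pos hpos]
      by_cases h2 : 0 < PySem.Int.floordiv e 2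
      · exact ih h2
      · have hd : (PySem.Int.floordiv e 2) = e / 2 := PySem.Int.floordiv_eq_ediv_of_pos (by norm_num)
        have he1 : e = 1 := by rw [hd] at h2; omega
        have hodd : PySem.Int.mod e 2 = 1 := by
          rw [PySem.Int.mod_eq_emod_of_pos (by norm_num), he1]
          decide
        rw [pvPowLoop, dif_neg h2, if_pos hodd]
        exact pvRed_mmul R M
  | case2 e R M hpos => exact absurd he hpos

lemma pvVmul_zmul (v : ZMod 1000000007 × ZMod 1000000007)
    (A B : ZMod 1000000007 × ZMod 1000000007 × ZMod 1000000007 × ZMod 1000000007) :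
    pvVmul v (pvZmul A B) = pvVmul (pvVmul v A) B := by
  obtain ⟨p, q⟩ := v; obtain ⟨a, b, c, d⟩ := A; obtain ⟨e, f, g, h⟩ := B
  simp only [pvVmul, pvZmul, Prod.mk.injEq]
  exact ⟨by ring, by ring⟩

lemma pvZstep_vmul (k : Int) (v : ZMod 1000000007 × ZMod 1000000007) :
    pvZstep k v = pvVmul v (0, 1, (k : ZMod 1000000007) - 1, (k : ZMod 1000000007) - 2) := by
  obtain ⟨p, q⟩ := v
  simp only [pvZstep, pvVmul, Prod.mk.injEq]
  exact ⟨by ring, by ring⟩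

lemma pvIter_vmul (k : Int) (e : Nat) (v : ZMod 1000000007 × ZMod 1000000007) :
    (pvZstep k)^[e] v = pvVmul v (pvZpow (0, 1, (k : ZMod 1000000007) - 1, (k : ZMod 1000000007) - 2) e) := by
  induction e with
  | zero =>
      obtain ⟨p, q⟩ := v
      simp only [Function.iterate_zero, id_eq, pvZpow, pvVmul, Prod.mk.injEq]
      exact ⟨by ring, by ring⟩
  | succ e ih =>
      rw [Function.iterate_succ_apply', ih, pvZstep_vmul, ← pvVmul_zmul]
      rfl

-- A's loop body as a named function (for the iterate lemmas)
def pvAstep (k : Int) (st : Int × Int) : Int × Int :=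
  (PySem.Int.mod (st.2 * (k - 1)) 1000000007,
   PySem.Int.mod (st.1 + PySem.Int.mod (st.2 * (k - 2)) 1000000007) 1000000007)

lemma pvFoldl_const {α β : Type} (f : α → α) (s : α) (l : List β) :
    l.foldl (fun a _ => f a) s = f^[l.length] s := by
  induction l generalizing s with
  | nil => rfl
  | cons x xs ih => simp [List.foldl_cons, ih, Function.iterate_succ_apply]

lemma pvAstep_cast (k : Int) (st : Int × Int) :
    pvCast2 (pvAstep k st) = pvZstep k (pvCast2 st) := by
  obtain ⟨a, b⟩ := st
  simp only [pvAstep, pvZstep, pvCast2, Prod.mk.injEq]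
  refine ⟨?_, ?_⟩ <;> (rw [pvCastMod]; push_cast [pvCastMod]; ring)

lemma pvAiter_cast (k : Int) (e : Nat) (st : Int × Int) :
    pvCast2 ((pvAstep k)^[e] st) = (pvZstep k)^[e] (pvCast2 st) := by
  induction e with
  | zero => rfl
  | succ e ih => rw [Function.iterate_succ_apply', Function.iterate_succ_apply', pvAstep_cast, ih]

lemma pvAiter_red (k : Int) (e : Nat) (st : Int × Int) (he : 0 < e) :
    pvRed2 ((pvAstep k)^[e] st) := by
  obtain ⟨e, rfl⟩ : ∃ e', e = e' + 1 := ⟨e - 1, by omega⟩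
  rw [Function.iterate_succ_apply']
  exact ⟨pvModRange _, pvModRange _⟩

lemma pvMain (n k x : Int) : countArray n k x = countArray_alt n k x := by
  by_cases hn : n ≤ 1
  · -- empty loop on both sides
    have hr : PySem.List.pyRange 1 n 1 = [] := by simp [PySem.List.pyRange]; omega
    have hl : pvPowLoop (n - 1) (1, 0, 0, 1) (0, 1, k - 1, k - 2) = (1, 0, 0, 1) := by
      rw [pvPowLoop, dif_neg (by omega)]
    simp only [countArray, countArray_alt, hr, List.foldl_nil, hl]
  · replace hn : 1 < n := by omega
    -- n > 1 : both results are the reduced residues of the same ZMod value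
    have hlen : (PySem.List.pyRange 1 n 1).length = (n - 1).toNat := by
      simp [PySem.List.pyRange]; omega
    set e : Nat := (n - 1).toNat with hedef
    have hepos : 0 < e := by omega
    -- A's state
    have hfold : (PySem.List.pyRange 1 n 1).foldl
        (fun (st : Int × Int) _ =>
          (PySem.Int.mod (st.2 * (k - 1)) 1000000007,
           PySem.Int.mod (st.1 + PySem.Int.mod (st.2 * (k - 2)) 1000000007) 1000000007))
        (1, 0) = (pvAstep k)^[e] (1, 0) := by
      rw [show (fun (st : Int × Int) (_ : Int) =>
          (PySem.Int.mod (st.2 * (k - 1)) 1000000007,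
           PySem.Int.mod (st.1 + PySem.Int.mod (st.2 * (k - 2)) 1000000007) 1000000007))
          = (fun st _ => pvAstep k st) from rfl, pvFoldl_const, hlen]
    set s : Int × Int := (pvAstep k)^[e] (1, 0) with hsdef
    have hsred : pvRed2 s := pvAiter_red k e (1, 0) hepos
    have hscast : pvCast2 s = pvVmul (1, 0)
        (pvZpow (0, 1, (k : ZMod 1000000007) - 1, (k : ZMod 1000000007) - 2) e) := by
      rw [hsdef, pvAiter_cast, pvIter_vmul]
      simp [pvCast2]
    -- B's state
    set R : Int × Int × Int × Int := pvPowLoop (n - 1) (1, 0, 0, 1) (0, 1, k - 1, k - 2) with hRdef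
    have hRred : pvRed4 R := pvLoop_red _ _ _ (by omega)
    have hRcast : pvCast4 R = pvZpow (0, 1, (k : ZMod 1000000007) - 1, (k : ZMod 1000000007) - 2) e := by
      rw [hRdef, pvLoop_cast]
      have h1 : pvCast4 (1, 0, 0, 1) = ((1 : ZMod 1000000007), 0, 0, 1) := by
        simp [pvCast4]
      have h2 : pvCast4 (0, 1, k - 1, k - 2)
          = ((0 : ZMod 1000000007), 1, (k : ZMod 1000000007) - 1, (k : ZMod 1000000007) - 2) := by
        simp [pvCast4]
      rw [h1, h2, pvZmul_one_left, ← hedef]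
    -- the reduced ints agree componentwise
    set P : ZMod 1000000007 × ZMod 1000000007 × ZMod 1000000007 × ZMod 1000000007 :=
      pvZpow (0, 1, (k : ZMod 1000000007) - 1, (k : ZMod 1000000007) - 2) e with hPdef
    have hv : pvVmul (1, 0) P = (P.1, P.2.1) := by
      obtain ⟨a, b, c, d⟩ := P
      simp only [pvVmul, Prod.mk.injEq]
      exact ⟨by ring, by ring⟩
    rw [hv] at hscast
    obtain ⟨s1, s2⟩ := s
    obtain ⟨r1, r2, r3, r4⟩ := R
    simp only [pvCast2, Prod.mk.injEq] at hscast
    simp only [pvCast4] at hRcast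
    have hr1 : ((r1 : ZMod 1000000007)) = P.1 := congrArg Prod.fst hRcast
    have hr2 : ((r2 : ZMod 1000000007)) = P.2.1 := congrArg (fun t => t.2.1) hRcast
    have e1 : s1 = r1 := by
      apply pvIntEqOfCast _ _ hsred.1.1 hsred.1.2 hRred.1.1 hRred.1.2
      rw [hscast.1, ← hr1]
    have e2 : s2 = r2 := by
      apply pvIntEqOfCast _ _ hsred.2.1 hsred.2.2 hRred.2.1.1 hRred.2.1.2
      rw [hscast.2, ← hr2]
    simp only [countArray, countArray_alt, hfold, ← hRdef, e1, e2]

-- ===== VERDICT (by name: the statement is the Claim_ definition above) =====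
theorem countArray_spec : Claim_equal_countArray := by
  intro n k x _
  unfold Spec_countArray
  exact pvMain n k x
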